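-- pv_equiv track=rewrite | github.com/SCarrasco1996/mvp-emotion-assistant | src/ui_gradio.py | _trim_llm_history
-- ===== SOURCE A (Python) =====
-- from typing import List, Optional, Tuple
--
-- def _trim_llm_history(llm_history: List[dict], max_turns: int) -> List[dict]:
--     """Mantiene el prefijo inicial 'system' y los últimos 'max_turns' turnos."""
--     if not llm_history:
--         return []
--
--     prefix_end = 0
--     while prefix_end < len(llm_history) and (llm_history[prefix_end] or {}).get("role") == "system":
--         prefix_end += 1
--
--     user_idxs = [i for i, m in enumerate(llm_history) if (m or {}).get("role") == "user"]
--     if len(user_idxs) <= max_turns: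
--         return llm_history
--
--     start_user = user_idxs[-max_turns]
--     start = start_user
--
--     while start > prefix_end and (llm_history[start - 1] or {}).get("role") == "system":
--         start -= 1
--
--     return llm_history[:prefix_end] + llm_history[start:]
-- ===== SOURCE B (Python) =====
-- def _trim_llm_history(llm_history, max_turns):
--     """Forward peeling pass: count users once, peel the system prefix, then drop
--     whole messages from the front until only max_turns users remain, keeping the
--     contiguous run of system messages just before the first kept user."""
--     users = sum(1 for m in llm_history if (m or {}).get("role") == "user")
--     if users <= max_turns:
--         return llm_history
--
--     prefix = []
--     tail = llm_history
--     while tail and (tail[0] or {}).get("role") == "system":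
--         prefix.append(tail[0])
--         tail = tail[1:]
--
--     excess = users - max_turns
--     while excess > 0 and tail:
--         if (tail[0] or {}).get("role") == "user":
--             excess -= 1
--         tail = tail[1:]
--
--     pending = []
--     while tail and (tail[0] or {}).get("role") != "user":
--         if (tail[0] or {}).get("role") == "system":
--             pending.append(tail[0])
--         else:
--             pending = []
--         tail = tail[1:]
--
--     return prefix + pending + tail
-- ===== Notes on version B (the rewrite author's own statement) =====
-- stated objective: alternative
-- what changed: Replaces A's forward enumeration of all user indices, negative-index slicing and backward system-run extension by a single forward peeling pass: count users once, peel the system prefix, drop messages from the front until only max_turns users remain, and carry the pending contiguous system run forward until the first kept user.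
-- outside the precondition, e.g. on _trim_llm_history([{'role': 'user'}], 0): A returns [{'role': 'user'}], B returns []; on _trim_llm_history([{'role': 'user'}, {'role': 'user'}], -1): A returns [{'role': 'user'}], B returns []; on _trim_llm_history([{'role': 'user'}], -1): A raises IndexError, B returns []
import Mathlib
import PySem

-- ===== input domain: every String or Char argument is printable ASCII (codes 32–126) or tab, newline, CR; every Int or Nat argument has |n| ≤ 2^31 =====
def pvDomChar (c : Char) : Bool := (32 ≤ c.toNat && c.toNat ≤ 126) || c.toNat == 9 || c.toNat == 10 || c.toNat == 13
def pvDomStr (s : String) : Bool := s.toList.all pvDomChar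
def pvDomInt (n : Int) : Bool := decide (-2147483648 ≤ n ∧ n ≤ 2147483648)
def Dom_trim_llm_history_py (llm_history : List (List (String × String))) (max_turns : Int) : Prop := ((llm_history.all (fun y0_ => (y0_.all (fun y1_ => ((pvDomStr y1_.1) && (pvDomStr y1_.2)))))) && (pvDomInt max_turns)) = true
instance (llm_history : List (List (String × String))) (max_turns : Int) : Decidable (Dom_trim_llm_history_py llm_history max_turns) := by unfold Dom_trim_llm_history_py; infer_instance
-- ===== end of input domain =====

-- B replaces A's list of all user indices + negative indexing + backward extension by a
-- single forward peeling pass carrying a pending system run (objective: alternative, same cost).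

-- (m or {}).get("role") — first-match association-list lookup
def pvRole (m : List (String × String)) : Option String :=
  (PySem.Dict.mk m).get? "role"

-- ===== PORT A =====
-- while prefix_end < len and (llm_history[prefix_end] or {}).get("role") == "system": prefix_end += 1
def aPrefixEnd : List (List (String × String)) → Nat
  | [] => 0
  | m :: rest => if pvRole m == some "system" then aPrefixEnd rest + 1 else 0

-- user_idxs = [i for i, m in enumerate(llm_history) if (m or {}).get("role") == "user"]
def aUserIdxs (h : List (List (String × String))) : List Int :=
  ((PySem.List.enumerate h).filter (fun p => pvRole p.2 == some "user")).map (·.1)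

-- while start > prefix_end and (llm_history[start-1] or {}).get("role") == "system": start -= 1
-- (llm_history[start-1] is always in range here, so List.getD is exact)
def aBack (h : List (List (String × String))) (prefix_end : Nat) : Nat → Nat
  | 0 => 0
  | s + 1 =>
    if prefix_end < s + 1 ∧ pvRole (h.getD s []) == some "system" then aBack h prefix_end s
    else s + 1

def trim_llm_history_py (llm_history : List (List (String × String))) (max_turns : Int) : List (List (String × String)) :=
  if llm_history = [] then []
  else
    let prefix_end := aPrefixEnd llm_history
    let user_idxs := aUserIdxs llm_history
    if (user_idxs.length : Int) ≤ max_turns then llm_history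
    else
      match PySem.List.pyGet? user_idxs (-max_turns) with
      | none => []  -- IndexError; excluded by Pre_
      | some start_user =>
        let start := aBack llm_history prefix_end start_user.toNat
        PySem.List.slice llm_history none (some (prefix_end : Int)) ++
          PySem.List.slice llm_history (some (start : Int)) none

-- ===== PORT B =====
-- users = sum(1 for m in llm_history if (m or {}).get("role") == "user")
def bCount : List (List (String × String)) → Nat
  | [] => 0
  | m :: r => (if pvRole m == some "user" then 1 else 0) + bCount r

-- while tail and (tail[0] or {}).get("role") == "system": prefix.append(tail[0]); tail = tail[1:]
def bSplit : List (List (String × String)) → List (List (String × String)) × List (List (String × String))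
  | [] => ([], [])
  | m :: r =>
    if pvRole m == some "system" then
      let p := bSplit r
      (m :: p.1, p.2)
    else ([], m :: r)

-- while excess > 0 and tail: (decrement on a user message) tail = tail[1:]
def bDrop : List (List (String × String)) → Nat → List (List (String × String))
  | l, 0 => l
  | [], _ + 1 => []
  | m :: r, e + 1 => if pvRole m == some "user" then bDrop r e else bDrop r (e + 1)

-- while tail and role != "user": keep the pending contiguous system run
def bPend : List (List (String × String)) → List (List (String × String)) → List (List (String × String))
  | [], acc => acc
  | m :: r, acc =>
    if pvRole m == some "user" then acc ++ (m :: r)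
    else if pvRole m == some "system" then bPend r (acc ++ [m])
    else bPend r []

def trim_llm_history_py_alt (llm_history : List (List (String × String))) (max_turns : Int) : List (List (String × String)) :=
  let users := bCount llm_history
  if (users : Int) ≤ max_turns then llm_history
  else
    let pr := bSplit llm_history
    let tail2 := bDrop pr.2 ((users : Int) - max_turns).toNat
    pr.1 ++ bPend tail2 []

-- ===== PRECONDITION & SPEC =====
-- closed-form user count for Pre_: first pair keyed "role" has value "user"
def pvUserCount (h : List (List (String × String))) : Nat :=
  h.countP (fun m => (m.find? (fun kv => kv.1 == "role")).map (·.2) == some "user")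

-- Pre_ restricts to the function's natural domain max_turns >= 1 (plus inputs that are
-- trivially unchanged: empty history, or no user messages with max_turns = 0): for
-- max_turns <= 0 with user messages present A either raises IndexError (negative
-- max_turns with too few users) or its negative-index wraparound user_idxs[-max_turns]
-- keeps everything from a front user index; B keeps only the system prefix there.
def Pre_trim_llm_history_py (llm_history : List (List (String × String))) (max_turns : Int) : Prop :=
  1 ≤ max_turns ∨ llm_history = [] ∨ (max_turns = 0 ∧ pvUserCount llm_history = 0)

instance (llm_history : List (List (String × String))) (max_turns : Int) : Decidable (Pre_trim_llm_history_py llm_history max_turns) := by unfold Pre_trim_llm_history_py; infer_instance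

def pvWitness_trim_llm_history_py : (List (List (String × String))) × Int :=
  ([[("role", "user")]], 1)

def Spec_trim_llm_history_py (llm_history : List (List (String × String))) (max_turns : Int) (out : List (List (String × String))) : Prop := out = trim_llm_history_py_alt llm_history max_turns
instance (llm_history : List (List (String × String))) (max_turns : Int) (out : List (List (String × String))) : Decidable (Spec_trim_llm_history_py llm_history max_turns out) := by unfold Spec_trim_llm_history_py; infer_instance

-- ===== CLAIM (what is proved, stated in full; the proofs are below) =====
def Claim_equal_trim_llm_history_py : Prop := ∀ (llm_history : List (List (String × String))) (max_turns : Int), Dom_trim_llm_history_py llm_history max_turns → Pre_trim_llm_history_py llm_history max_turns → Spec_trim_llm_history_py llm_history max_turns (trim_llm_history_py llm_history max_turns)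

-- ===== LEMMAS AND PROOFS =====

-- positions (0-based) of the user messages of a list
def uPos : List (List (String × String)) → List Nat
  | [] => []
  | m :: r => if pvRole m == some "user" then 0 :: (uPos r).map (· + 1) else (uPos r).map (· + 1)

-- backward system-run extension inside the tail (no prefix floor; a user blocks it)
def tBack (t : List (List (String × String))) : Nat → Nat
  | 0 => 0
  | s + 1 => if pvRole (t.getD s []) == some "system" then tBack t s else s + 1

theorem sys_not_user {m : List (String × String)} (h : (pvRole m == some "system") = true) :
    (pvRole m == some "user") = false := by
  cases hu : pvRole m == some "user"
  · rfl
  · exfalso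
    have h1 : pvRole m = some "system" := by simpa using h
    have h2 : pvRole m = some "user" := by simpa using hu
    rw [h1] at h2; simp at h2

theorem user_not_sys {m : List (String × String)} (h : (pvRole m == some "user") = true) :
    (pvRole m == some "system") = false := by
  cases hs : pvRole m == some "system"
  · rfl
  · exfalso
    have h1 : pvRole m = some "system" := by simpa using hs
    have h2 : pvRole m = some "user" := by simpa using h
    rw [h1] at h2; simp at h2

theorem bCount_eq (h : List (List (String × String))) : bCount h = (uPos h).length := by
  induction h with
  | nil => rfl
  | cons m r ih =>
    by_cases hm : pvRole m == some "user" <;> simp [bCount, uPos, hm, ih] <;> omega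

-- the Dict lookup of the ports is the first-match find? of pvUserCount's predicate
theorem pvRole_eq_find (m : List (String × String)) :
    pvRole m = (m.find? (fun kv => kv.1 == "role")).map (·.2) := by
  induction m with
  | nil => rfl
  | cons kv rest ih =>
    rw [pvRole, PySem.Dict.get?_mk_cons, List.find?_cons]
    by_cases hk : kv.1 == "role"
    · simp [hk]
    · have hk' : (kv.1 == "role") = false := by simpa using hk
      have hk2 : ("role" == kv.1) = false := by
        cases hbe : "role" == kv.1
        · rfl
        · exact absurd (by simpa [BEq.comm] using hbe) hk
      simp [hk', ← ih, pvRole]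

theorem bCount_eq_pvUserCount (h : List (List (String × String))) :
    bCount h = pvUserCount h := by
  induction h with
  | nil => rfl
  | cons m r ih =>
    have hp : ((m.find? (fun kv => kv.1 == "role")).map (·.2) == some "user")
        = (pvRole m == some "user") := by rw [pvRole_eq_find]
    by_cases hm : pvRole m == some "user" <;>
      simp [bCount, pvUserCount, List.countP_cons, hp, hm] at * <;> omega

-- user indices of an enumerated segment
def uIdx (l : List (Int × List (String × String))) : List Int :=
  (l.filter (fun p => pvRole p.2 == some "user")).map (·.1)

theorem uIdx_enumerate (h : List (List (String × String))) (s : Int) :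
    uIdx (PySem.List.enumerate h s) = (uPos h).map (fun n : Nat => ((n : Int) + s)) := by
  induction h generalizing s with
  | nil => rfl
  | cons m r ih =>
    rw [PySem.List.enumerate_cons]
    have hmap : ((uPos r).map (· + 1)).map (fun n : Nat => (n : Int) + s)
        = (uPos r).map (fun n : Nat => (n : Int) + (s + 1)) := by
      rw [List.map_map]
      apply List.map_congr_left
      intro a _
      simp only [Function.comp]
      push_cast; ring
    have hun : List.map (fun p => p.1) (List.filter (fun p => pvRole p.2 == some "user") (PySem.List.enumerate r (s+1))) = uIdx (PySem.List.enumerate r (s+1)) := rfl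
    by_cases hm : (pvRole m == some "user") = true
    · simp only [uIdx, uPos, hm, if_true, List.filter_cons, List.map_cons, hmap]
      rw [hun, ih]
      simp [hmap]
    · have hm' : (pvRole m == some "user") = false := by
        cases hx : pvRole m == some "user"
        · rfl
        · exact absurd hx (by simpa using hm)
      simp only [uIdx, uPos, hm', Bool.false_eq_true, if_false, List.filter_cons]
      rw [hun, ih]
      simp [hmap]

theorem aUserIdxs_eq (h : List (List (String × String))) :
    aUserIdxs h = (uPos h).map (fun n : Nat => (n : Int)) := by
  have := uIdx_enumerate h 0
  simpa [aUserIdxs, uIdx] using this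

theorem bSplit_eq (h : List (List (String × String))) :
    bSplit h = (h.take (aPrefixEnd h), h.drop (aPrefixEnd h)) := by
  induction h with
  | nil => rfl
  | cons m r ih =>
    by_cases hm : pvRole m == some "system" <;> simp [bSplit, aPrefixEnd, hm, ih]

theorem uPos_shift (h : List (List (String × String))) :
    uPos h = (uPos (h.drop (aPrefixEnd h))).map (· + aPrefixEnd h) := by
  induction h with
  | nil => rfl
  | cons m r ih =>
    by_cases hm : pvRole m == some "system"
    · have hu := sys_not_user hm
      simp only [uPos, hu, Bool.false_eq_true, if_false, aPrefixEnd, hm, if_true,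
        List.drop_succ_cons]
      rw [ih, List.map_map]
      apply List.map_congr_left
      intro a _; simp; omega
    · simp [aPrefixEnd, hm]

theorem uPos_mem (t : List (List (String × String))) (n : Nat) :
    n ∈ uPos t ↔ (n < t.length ∧ (pvRole (t.getD n []) == some "user") = true) := by
  induction t generalizing n with
  | nil => simp [uPos]
  | cons m r ih =>
    cases n with
    | zero =>
      by_cases hm : pvRole m == some "user" <;> simp [uPos, hm]
    | succ n =>
      by_cases hm : pvRole m == some "user" <;>
        simp [uPos, hm, ih n, List.getD_cons_succ] <;> omega

theorem uPos_sorted (t : List (List (String × String))) : (uPos t).Pairwise (· < ·) := by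
  induction t with
  | nil => simp [uPos]
  | cons m r ih =>
    by_cases hm : pvRole m == some "user" <;> simp only [uPos, hm, if_true, if_false]
    · refine List.Pairwise.cons ?_ (List.Pairwise.map _ (by omega) ih)
      intro x hx
      simp only [List.mem_map] at hx
      omega
    · exact List.Pairwise.map _ (by omega) ih

-- dropping e+1 users from the front lands one past the e-th user position
theorem bDrop_eq (t : List (List (String × String))) (e v : Nat)
    (hv : (uPos t)[e]? = some v) : bDrop t (e + 1) = t.drop (v + 1) := by
  induction t generalizing e v with
  | nil => simp [uPos] at hv
  | cons m r ih =>
    by_cases hm : pvRole m == some "user"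
    · simp only [uPos, hm, if_true] at hv
      cases e with
      | zero =>
        simp only [List.getElem?_cons_zero, Option.some.injEq] at hv
        subst hv
        simp [bDrop, hm]
      | succ e =>
        simp only [List.getElem?_cons_succ, List.getElem?_map] at hv
        cases hw : (uPos r)[e]? with
        | none => rw [hw] at hv; simp at hv
        | some w =>
          rw [hw] at hv
          simp only [Option.map_some, Option.some.injEq] at hv
          subst hv
          have hstep : bDrop (m :: r) (e + 1 + 1) = bDrop r (e + 1) := by
            simp [bDrop, hm]
          rw [hstep, ih e w hw, List.drop_succ_cons]
    · simp only [uPos, hm, Bool.false_eq_true, if_false, List.getElem?_map] at hv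
      cases hw : (uPos r)[e]? with
      | none => rw [hw] at hv; simp at hv
      | some w =>
        rw [hw] at hv
        simp only [Option.map_some, Option.some.injEq] at hv
        subst hv
        have hstep : bDrop (m :: r) (e + 1) = bDrop r (e + 1) := by
          cases e <;> simp [bDrop, hm]
        rw [hstep, ih e w hw, List.drop_succ_cons]

-- no user strictly between two uPos entries at consecutive ranks
theorem uPos_gap (t : List (List (String × String))) (i j a b : Nat)
    (hij : i + 1 = j) (ha : (uPos t)[i]? = some a) (hb : (uPos t)[j]? = some b)
    (x : Nat) (h1 : a < x) (h2 : x < b) :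
    ¬ (x < t.length ∧ (pvRole (t.getD x []) == some "user") = true) := by
  intro hx
  have hmem : x ∈ uPos t := (uPos_mem t x).2 hx
  obtain ⟨m, hm, hxm⟩ := List.getElem_of_mem hmem
  have hpw := (List.pairwise_iff_getElem.1 (uPos_sorted t))
  have hia : i < (uPos t).length := (List.getElem?_eq_some_iff.1 ha).1
  have hja : j < (uPos t).length := (List.getElem?_eq_some_iff.1 hb).1
  have hav : (uPos t)[i] = a := by
    have := List.getElem?_eq_getElem hia; rw [ha] at this; simpa using this.symm
  have hbv : (uPos t)[j] = b := by
    have := List.getElem?_eq_getElem hja; rw [hb] at this; simpa using this.symm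
  -- i < m and m < j is impossible since j = i + 1
  have him : i < m := by
    by_contra hle
    push_neg at hle
    rcases Nat.lt_or_ge m i with hlt | hge
    · have := hpw m i hm hia hlt
      omega
    · have : m = i := by omega
      subst this; omega
  have hmj : m < j := by
    by_contra hle
    push_neg at hle
    rcases Nat.lt_or_ge j m with hlt | hge
    · have := hpw j m hja hm hlt
      omega
    · have : m = j := by omega
      subst this; omega
  omega

-- tBack stops exactly at the left end of an all-system run with a non-system left neighbour
theorem tBack_char (t : List (List (String × String))) (c j : Nat) (hcj : c ≤ j)
    (hrun : ∀ i, c ≤ i → i < j → (pvRole (t.getD i []) == some "system") = true)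
    (hstop : c = 0 ∨ (pvRole (t.getD (c - 1) []) == some "system") = false) :
    tBack t j = c := by
  induction j with
  | zero =>
    have hc0 : c = 0 := by omega
    subst hc0; rfl
  | succ j ih =>
    by_cases hc : c = j + 1
    · subst hc
      rcases hstop with h0 | hns
      · omega
      · rw [show j + 1 - 1 = j from rfl] at hns
        show (if pvRole (t.getD j []) == some "system" then tBack t j else j + 1) = j + 1
        rw [hns]
        simp
    · have hcle : c ≤ j := by omega
      have hsys := hrun j (by omega) (by omega)
      simp only [tBack, hsys, if_true]
      exact ih hcle (fun i h1 h2 => hrun i h1 (by omega))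

-- aBack over the full list is tBack over the tail, shifted by the prefix length
theorem aBack_shift (h : List (List (String × String))) (P x : Nat) :
    aBack h P (x + P) = P + tBack (h.drop P) x := by
  induction x with
  | zero =>
    cases hP : P with
    | zero => simp [aBack, tBack]
    | succ s =>
      simp only [Nat.zero_add, tBack, Nat.add_zero]
      show aBack h (s+1) (s+1) = s + 1
      simp [aBack]
  | succ x ih =>
    have hget : (h.drop P).getD x [] = h.getD (x + P) [] := by
      simp [List.getD_eq_getElem?_getD, List.getElem?_drop, Nat.add_comm]
    rw [show x + 1 + P = (x + P) + 1 from by omega]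
    show aBack h P ((x + P) + 1) = P + tBack (h.drop P) (x + 1)
    simp only [aBack, tBack, hget]
    cases hs : pvRole (h.getD (x + P) []) == some "system"
    · rw [if_neg (by simp), if_neg (by simp)]
      omega
    · rw [if_pos ⟨by omega, rfl⟩, if_pos rfl]
      exact ih

-- main invariant of B's pending-run loop
theorem bPend_main (t : List (List (String × String))) (j : Nat)
    (hj : j < t.length) (hu : (pvRole (t.getD j []) == some "user") = true) :
    ∀ n q c, j - q = n → c ≤ q → q ≤ j → 0 < c →
      (pvRole (t.getD (c - 1) []) == some "system") = false →
      (∀ i, c ≤ i → i < q → (pvRole (t.getD i []) == some "system") = true) →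
      (∀ i, q ≤ i → i < j → (pvRole (t.getD i []) == some "user") = false) →
      bPend (t.drop q) ((t.drop c).take (q - c)) = t.drop (tBack t j) := by
  intro n
  induction n with
  | zero =>
    intro q c hn hcq hqj hc hstop hrun _
    have hq : j = q := by omega
    subst hq
    have hdrop : t.drop j = t.getD j [] :: t.drop (j + 1) := by
      rw [List.getD_eq_getElem?_getD, List.getElem?_eq_getElem hj]
      simpa using List.drop_eq_getElem_cons hj
    rw [hdrop]
    simp only [bPend, hu, if_true]
    rw [← hdrop]
    rw [tBack_char t c j hcq hrun (Or.inr hstop)]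
    have hdd : t.drop j = (t.drop c).drop (j - c) := by
      rw [List.drop_drop]; congr 1; omega
    rw [hdd, List.take_append_drop]
  | succ n ih =>
    intro q c hn hcq hqj hc hstop hrun hnouser
    have hql : q < j := by omega
    have hqlen : q < t.length := by omega
    have hdrop : t.drop q = t.getD q [] :: t.drop (q + 1) := by
      rw [List.getD_eq_getElem?_getD, List.getElem?_eq_getElem hqlen]
      simpa using List.drop_eq_getElem_cons hqlen
    have hnu : (pvRole (t.getD q []) == some "user") = false := hnouser q (le_refl q) hql
    rw [hdrop]
    simp only [bPend, hnu, Bool.false_eq_true, if_false]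
    by_cases hsys : (pvRole (t.getD q []) == some "system") = true
    · simp only [hsys, if_true]
      have hacc : (t.drop c).take (q - c) ++ [t.getD q []] = (t.drop c).take (q + 1 - c) := by
        have : q + 1 - c = (q - c) + 1 := by omega
        rw [this, List.take_succ]
        congr 1
        rw [List.getElem?_drop]
        rw [show c + (q - c) = q from by omega]
        rw [List.getElem?_eq_getElem hqlen]
        simp [List.getD_eq_getElem?_getD, List.getElem?_eq_getElem hqlen]
      rw [hacc]
      exact ih (q + 1) c (by omega) (by omega) (by omega) hc hstop
        (fun i h1 h2 => by
          rcases Nat.lt_or_ge i q with hlt | hge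
          · exact hrun i h1 hlt
          · have : i = q := by omega
            subst this; exact hsys)
        (fun i h1 h2 => hnouser i (by omega) h2)
    · have hsys' : (pvRole (t.getD q []) == some "system") = false := by
        cases hss : pvRole (t.getD q []) == some "system"
        · rfl
        · exact absurd hss (by simpa using hsys)
      simp only [hsys', Bool.false_eq_true, if_false]
      have : ([] : List (List (String × String))) = (t.drop (q + 1)).take (q + 1 - (q + 1)) := by simp
      rw [this]
      have heq : (t.drop (q+1)).take (q + 1 - (q + 1)) = (t.drop (q+1)).take ((q+1) - (q+1)) := rfl
      exact ih (q + 1) (q + 1) (by omega) (le_refl _) (by omega) (by omega)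
        (by simpa using hsys')
        (fun i h1 h2 => by omega)
        (fun i h1 h2 => hnouser i (by omega) h2)

-- ===== VERDICT (by name: the statement is the Claim_ definition above) =====
theorem trim_llm_history_py_spec : Claim_equal_trim_llm_history_py := by
  intro h mt _hdom hpre
  unfold Spec_trim_llm_history_py
  have hbdropnil : ∀ e, bDrop [] e = [] := fun e => by cases e <;> rfl
  by_cases hnil : h = []
  · subst hnil
    simp [trim_llm_history_py, trim_llm_history_py_alt, bCount, bSplit, bPend, hbdropnil]
  · have hcnt : ((bCount h : Nat) : Int) = ((aUserIdxs h).length : Int) := by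
      rw [bCount_eq, aUserIdxs_eq, List.length_map]
    by_cases hle : (((aUserIdxs h).length : Nat) : Int) ≤ mt
    · -- no trimming on either side
      rw [trim_llm_history_py, trim_llm_history_py_alt]
      simp only [if_neg hnil]
      rw [if_pos hle, if_pos (by rw [hcnt]; exact hle)]
    · -- trimming branch
      have hmt1 : 1 ≤ mt := by
        rcases hpre with h1 | h2 | ⟨h3, h4⟩
        · exact h1
        · exact absurd h2 hnil
        · exfalso
          have hz : bCount h = 0 := by rw [bCount_eq_pvUserCount, h4]
          rw [hz] at hcnt
          omega
      have hlenU : (aUserIdxs h).length = (uPos (h.drop (aPrefixEnd h))).length := by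
        rw [aUserIdxs_eq, List.length_map, uPos_shift h, List.length_map]
      have hmtlt : mt < (((uPos (h.drop (aPrefixEnd h))).length : Nat) : Int) := by
        rw [← hlenU]; omega
      have hkpos : 0 < mt.toNat := by omega
      have hkle : mt.toNat ≤ (aUserIdxs h).length := by omega
      have hbc : bCount h = (uPos (h.drop (aPrefixEnd h))).length := by
        rw [bCount_eq, uPos_shift h, List.length_map]
      -- the two user positions around the cut
      have hElt : (uPos (h.drop (aPrefixEnd h))).length - mt.toNat
          < (uPos (h.drop (aPrefixEnd h))).length := by omega
      have hE1lt : (uPos (h.drop (aPrefixEnd h))).length - mt.toNat - 1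
          < (uPos (h.drop (aPrefixEnd h))).length := by omega
      obtain ⟨j, hjq⟩ : ∃ v, (uPos (h.drop (aPrefixEnd h)))[(uPos (h.drop (aPrefixEnd h))).length - mt.toNat]? = some v :=
        ⟨_, List.getElem?_eq_getElem hElt⟩
      obtain ⟨prev, hprev⟩ : ∃ v, (uPos (h.drop (aPrefixEnd h)))[(uPos (h.drop (aPrefixEnd h))).length - mt.toNat - 1]? = some v :=
        ⟨_, List.getElem?_eq_getElem hE1lt⟩
      obtain ⟨hjl, hje⟩ := List.getElem?_eq_some_iff.1 hjq
      obtain ⟨hpl, hpe⟩ := List.getElem?_eq_some_iff.1 hprev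
      have hprevj : prev < j := by
        have := (List.pairwise_iff_getElem.1 (uPos_sorted (h.drop (aPrefixEnd h))))
          ((uPos (h.drop (aPrefixEnd h))).length - mt.toNat - 1)
          ((uPos (h.drop (aPrefixEnd h))).length - mt.toNat) hpl hjl (by omega)
        rw [hpe, hje] at this
        exact this
      have hjmem := (uPos_mem (h.drop (aPrefixEnd h)) j).1 (hje ▸ List.getElem_mem hjl)
      have hpmem := (uPos_mem (h.drop (aPrefixEnd h)) prev).1 (hpe ▸ List.getElem_mem hpl)
      -- A's indexing: user_idxs[-max_turns] = j + prefix_end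
      have hAidx : PySem.List.pyGet? (aUserIdxs h) (-mt) = some (((j + aPrefixEnd h : Nat) : Int)) := by
        rw [show -mt = -(mt.toNat : Int) from by omega,
          PySem.List.pyGet?_neg_natCast _ _ hkpos hkle]
        rw [aUserIdxs_eq, uPos_shift h]
        simp only [List.getElem?_map, List.length_map]
        rw [hjq]
        rfl
      -- B's drop: lands just past the user before the cut
      have hdropB : bDrop (h.drop (aPrefixEnd h)) (((bCount h : Nat) : Int) - mt).toNat
          = (h.drop (aPrefixEnd h)).drop (prev + 1) := by
        rw [show (((bCount h : Nat) : Int) - mt).toNat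
            = ((uPos (h.drop (aPrefixEnd h))).length - mt.toNat - 1) + 1 from by rw [hbc]; omega]
        exact bDrop_eq _ _ _ hprev
      have hkltL : mt.toNat < (uPos (h.drop (aPrefixEnd h))).length := by omega
      have hsucc : (uPos (h.drop (aPrefixEnd h))).length - mt.toNat - 1 + 1
          = (uPos (h.drop (aPrefixEnd h))).length - mt.toNat := by omega
      -- B's pending loop reaches the same cut as A's backward extension
      have hpend : bPend ((h.drop (aPrefixEnd h)).drop (prev + 1)) []
          = (h.drop (aPrefixEnd h)).drop (tBack (h.drop (aPrefixEnd h)) j) := by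
        have hmain := bPend_main (h.drop (aPrefixEnd h)) j hjmem.1 hjmem.2
          (j - (prev + 1)) (prev + 1) (prev + 1) rfl (le_refl _) (by omega) (by omega)
          (by simpa using user_not_sys hpmem.2)
          (fun i h1 h2 => by omega)
          (fun i h1 h2 => by
            cases hb : pvRole ((h.drop (aPrefixEnd h)).getD i []) == some "user"
            · rfl
            · exact absurd ⟨by omega, hb⟩
                (uPos_gap (h.drop (aPrefixEnd h))
                  ((uPos (h.drop (aPrefixEnd h))).length - mt.toNat - 1)
                  ((uPos (h.drop (aPrefixEnd h))).length - mt.toNat) prev j hsucc hprev hjq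
                  i (by omega) h2))
        simpa using hmain
      -- assemble both sides
      rw [trim_llm_history_py, trim_llm_history_py_alt]
      simp only [if_neg hnil]
      rw [if_neg hle, if_neg (by rw [hcnt]; exact hle)]
      rw [bSplit_eq h]
      simp only [hAidx, hdropB, hpend, Int.toNat_natCast]
      rw [PySem.List.slice_to_natCast, PySem.List.slice_from_natCast]
      rw [aBack_shift]
      rw [List.drop_drop]
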